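-- pv_equiv track=rewrite | github.com/fengxuyy/MPIF-GUI | backend/mpif_converter.py | _extract_text_block
-- ===== SOURCE A (Python) =====
-- from typing import Dict, Any, List, Optional, Union
--
-- def _extract_text_block(lines: List[str], key: str) -> Optional[str]:
--     """Extract text block (between semicolons) for a given key."""
--     start_idx = None
--     for i, line in enumerate(lines):
--         if line.startswith(key):
--             start_idx = i
--             break
--
--     if start_idx is None:
--         return None
--
--     content = []
--     in_block = False
--
--     for i in range(start_idx + 1, len(lines)):
--         line = lines[i]
--         if line == ';':
--             if in_block:
--                 break  # End of block
--             else: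
--                 in_block = True  # Start of block
--         elif in_block:
--             content.append(line)
--
--     return '\n'.join(content) if content else None
-- ===== SOURCE B (Python) =====
-- from typing import List, Optional
--
-- def _extract_text_block(lines: List[str], key: str) -> Optional[str]:
--     """Extract text block (between semicolons) for a given key."""
--     start = next((i for i, line in enumerate(lines) if line.startswith(key)), None)
--     if start is None:
--         return None
--     rest = lines[start + 1:]
--     try:
--         first = rest.index(';')
--     except ValueError:
--         return None
--     tail = rest[first + 1:]
--     try:
--         second = tail.index(';')
--     except ValueError:
--         second = len(tail)
--     block = tail[:second]
--     return '\n'.join(block) if block else None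
-- ===== Notes on version B (the rewrite author's own statement) =====
-- stated objective: alternative
-- what changed: Replaces A's single stateful in_block-flag scan with boundary-index computation: locate the first ';' after the key line and the next ';' (defaulting to the end), then slice the lines between them.
import Mathlib
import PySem

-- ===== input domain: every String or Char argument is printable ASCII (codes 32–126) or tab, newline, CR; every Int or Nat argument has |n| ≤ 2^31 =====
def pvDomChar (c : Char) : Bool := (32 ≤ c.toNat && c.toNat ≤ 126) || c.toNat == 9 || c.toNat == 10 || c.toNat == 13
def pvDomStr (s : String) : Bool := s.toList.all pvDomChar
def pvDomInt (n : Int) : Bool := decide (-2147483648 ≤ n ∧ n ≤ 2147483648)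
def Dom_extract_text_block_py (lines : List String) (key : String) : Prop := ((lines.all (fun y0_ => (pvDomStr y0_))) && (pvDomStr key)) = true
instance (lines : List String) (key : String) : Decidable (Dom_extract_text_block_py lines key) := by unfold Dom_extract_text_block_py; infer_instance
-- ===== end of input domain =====

-- B replaces A's stateful in_block-flag scan with boundary-index scans and a slice (alternative decomposition, same cost).

-- ===== PORT A =====
-- first loop: enumerate with break on startswith
def pvAFindStart (key : String) : List String → Nat → Option Nat
  | [], _ => none
  | l :: rest, i =>
    if PySem.Str.startswith l key then some i else pvAFindStart key rest (i + 1)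

-- second loop: over lines[start_idx+1:], state (in_block, content), break on second ';'
def pvALoop : List String → Bool → List String → List String
  | [], _, acc => acc
  | l :: rest, inb, acc =>
    if l = ";" then
      (if inb then acc else pvALoop rest true acc)
    else if inb then pvALoop rest inb (acc ++ [l])
    else pvALoop rest inb acc

def extract_text_block_py (lines : List String) (key : String) : Option String :=
  match pvAFindStart key lines 0 with
  | none => none
  | some start_idx =>
    let content := pvALoop (lines.drop (start_idx + 1)) false []
    if content.isEmpty then none else some (PySem.Str.join "\n" content)

-- ===== PORT B =====
def extract_text_block_py_alt (lines : List String) (key : String) : Option String :=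
  match lines.findIdx? (fun l => PySem.Str.startswith l key) with
  | none => none
  | some start =>
    let rest := lines.drop (start + 1)          -- lines[start+1:]
    match PySem.List.index? rest ";" with
    | none => none
    | some first =>
      let tail := rest.drop (first + 1)         -- rest[first+1:]
      let second := (PySem.List.index? tail ";").getD tail.length
      let block := tail.take second             -- tail[:second]
      if block.isEmpty then none else some (PySem.Str.join "\n" block)

-- ===== PRECONDITION & SPEC =====
def Spec_extract_text_block_py (lines : List String) (key : String) (out : Option String) : Prop := out = extract_text_block_py_alt lines key
instance (lines : List String) (key : String) (out : Option String) : Decidable (Spec_extract_text_block_py lines key out) := by unfold Spec_extract_text_block_py; infer_instance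

-- ===== CLAIM (what is proved, stated in full; the proofs are below) =====
def Claim_equal_extract_text_block_py : Prop := ∀ (lines : List String) (key : String), Dom_extract_text_block_py lines key → Spec_extract_text_block_py lines key (extract_text_block_py lines key)

-- ===== LEMMAS AND PROOFS =====

-- A's enumerate/break loop computes findIdx? (shifted by the running counter)
theorem pvAFindStart_eq (key : String) (l : List String) :
    ∀ i, pvAFindStart key l i = (l.findIdx? (fun s => PySem.Str.startswith s key)).map (· + i) := by
  induction l with
  | nil => intro i; rfl
  | cons x rest ih =>
    intro i
    by_cases h : PySem.Chars.startswith x.toList key.toList = true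
    · simp [pvAFindStart, List.findIdx?_cons, h]
    · simp [pvAFindStart, List.findIdx?_cons, h, ih (i + 1)]
      cases hk : List.findIdx? (fun s => PySem.Chars.startswith s.toList key.toList) rest
      · simp
      · simp; omega

-- lines before the first ';' are skipped by A's loop (flag still unset)
theorem pvALoop_skip (pre : List String) (h : (";" : String) ∉ pre) :
    ∀ (l acc : List String), pvALoop (pre ++ l) false acc = pvALoop l false acc := by
  induction pre with
  | nil => intro l acc; rfl
  | cons x p ih =>
    intro l acc
    have hx : x ≠ ";" := fun hx => h (by simp [hx])
    have hp : (";" : String) ∉ p := fun hm => h (List.mem_cons_of_mem _ hm)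
    simp [pvALoop, hx, ih hp]

-- A's loop with the flag set collects lines until the next ';'
theorem pvALoop_true (s : List String) : ∀ acc, pvALoop s true acc = acc ++ s.takeWhile (· ≠ ";") := by
  induction s with
  | nil => intro acc; simp [pvALoop]
  | cons x rest ih =>
    intro acc
    by_cases h : x = ";"
    · simp [pvALoop, h]
    · simp [pvALoop, h, ih]

theorem takeWhile_no_semi (t : List String) (h : (";" : String) ∉ t) :
    t.takeWhile (· ≠ ";") = t := by
  induction t with
  | nil => rfl
  | cons x p ih =>
    have hx : x ≠ ";" := fun hx => h (by simp [hx])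
    simpa [hx] using ih (fun hm => h (List.mem_cons_of_mem _ hm))

theorem takeWhile_pre (pre suf : List String) (h : (";" : String) ∉ pre) :
    ((pre ++ ";" :: suf).takeWhile (· ≠ ";")) = pre := by
  induction pre with
  | nil => simp
  | cons x p ih =>
    have hx : x ≠ ";" := fun hx => h (by simp [hx])
    simpa [hx] using ih (fun hm => h (List.mem_cons_of_mem _ hm))

-- B's take-of-(index? getD length) is takeWhile up to the first ';'
theorem take_index_getD (t : List String) :
    t.take ((PySem.List.index? t ";").getD t.length) = t.takeWhile (· ≠ ";") := by
  rcases hk : PySem.List.index? t ";" with _ | k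
  · rw [PySem.List.index?_eq_none_iff] at hk
    simpa using (takeWhile_no_semi t hk).symm
  · obtain ⟨pre, suf, rfl, rfl, hpre⟩ := (PySem.List.index?_eq_some_iff t ";" k).mp hk
    rw [takeWhile_pre _ _ hpre]
    simp

-- ===== VERDICT (by name: the statement is the Claim_ definition above) =====
theorem extract_text_block_py_spec : Claim_equal_extract_text_block_py := by
  intro lines key _
  unfold Spec_extract_text_block_py extract_text_block_py extract_text_block_py_alt
  rw [pvAFindStart_eq]
  cases hF : lines.findIdx? (fun l => PySem.Str.startswith l key) with
  | none => simp
  | some start =>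
    simp only [Option.map_some, Nat.add_zero]
    rcases hk : PySem.List.index? (lines.drop (start + 1)) ";" with _ | k
    · have hmem := (PySem.List.index?_eq_none_iff (lines.drop (start + 1)) ";").mp hk
      have hA : pvALoop (lines.drop (start + 1)) false [] = ([] : List String) := by
        simpa using pvALoop_skip (lines.drop (start + 1)) hmem [] []
      rw [PySem.List.index?_eq_idxOf?] at hk
      simp [hA]
    · obtain ⟨pre, suf, hsplit, hlen, hpre⟩ := (PySem.List.index?_eq_some_iff (lines.drop (start + 1)) ";" k).mp hk
      have hA : pvALoop (lines.drop (start + 1)) false [] = suf.takeWhile (· ≠ ";") := by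
        rw [hsplit, pvALoop_skip pre hpre]
        simp [pvALoop, pvALoop_true]
      have hdrop : (lines.drop (start + 1)).drop (k + 1) = suf := by
        rw [hsplit, ← hlen]
        simp [List.drop_append]
      have hti := take_index_getD suf
      rw [PySem.List.index?_eq_idxOf?] at hk hti
      simp [hA, hdrop, hti]
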